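-- pv_equiv track=rewrite | github.com/yAquila/RAGSmith | rag_pipeline/core/modular_implementations/query_expansion.py | _parse_documents_from_response
-- ===== SOURCE A (Python) =====
-- from typing import List, Dict, Any, TypedDict
--
-- def _parse_documents_from_response(response_text: str) -> List[str]:
--     """
--     Parse documents from response text that follows the format:
--     **Document 1:**
--     [content]
--     **Document 2:**
--     [content]
--     ...
--     """
--     documents = []
--     lines = response_text.strip().split('\n')
--     current_document = []
--     in_document = False
--
--     for line in lines:
--         line = line.strip()
--         if not line:
--             continue
--
--         # Check if this line starts a new document - handle markdown formatting
--         if (line.lower().startswith('**document ') and ':**' in line) or \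
--            (line.lower().startswith('document ') and ':' in line) or \
--            (line.lower().startswith('doc ') and ':' in line) or \
--            (line[0].isdigit() and '.' in line and ':' in line):
--             # Save previous document if we have one
--             if current_document and in_document:
--                 documents.append('\n'.join(current_document).strip())
--                 current_document = []
--             in_document = True
--             # Skip the document header line
--             continue
--
--         # If we're in a document, add the line
--         if in_document:
--             current_document.append(line)
--
--     # Don't forget the last document
--     if current_document and in_document:
--         documents.append('\n'.join(current_document).strip())
--
--     # If no documents were found with the structured format, try to split by common separators
--     if not documents and response_text.strip():
--         # Try to split by double newlines or other common separators
--         parts = response_text.split('\n\n')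
--         if len(parts) > 1:
--             for part in parts:
--                 part = part.strip()
--                 if part and not part.lower().startswith('document'):
--                     documents.append(part)
--
--         # If still no documents, treat the entire response as one document
--         if not documents:
--             documents.append(response_text.strip())
--
--     return documents
-- ===== SOURCE B (Python) =====
-- def _is_header(line: str) -> bool:
--     low = line.lower()
--     return (low.startswith('**document ') and ':**' in line) or \
--            (low.startswith('document ') and ':' in line) or \
--            (low.startswith('doc ') and ':' in line) or \
--            (line[0].isdigit() and '.' in line and ':' in line)
--
--
-- def _parse_documents_from_response(response_text: str) -> list:
--     # Phase 1: non-empty stripped lines.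
--     lines = [s for s in (l.strip() for l in response_text.strip().split('\n')) if s]
--     # Phase 2: drop everything before the first header, then group content
--     # between consecutive headers; non-empty groups become documents.
--     while lines and not _is_header(lines[0]):
--         lines.pop(0)
--     documents = []
--     while lines:
--         lines.pop(0)  # consume the header line
--         content = []
--         while lines and not _is_header(lines[0]):
--             content.append(lines.pop(0))
--         if content:
--             documents.append('\n'.join(content).strip())
--     # Fallback: no structured documents found.
--     if not documents and response_text.strip():
--         parts = [p.strip() for p in response_text.split('\n\n')]
--         if len(parts) > 1:
--             documents = [p for p in parts if p and not p.lower().startswith('document')]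
--         if not documents:
--             documents = [response_text.strip()]
--     return documents
-- ===== Notes on version B (the rewrite author's own statement) =====
-- stated objective: alternative
-- what changed: Replaces A's in_document/current_document running-state machine over raw lines with a two-phase decomposition: first compute the stripped non-empty lines, then drop everything before the first header and group the content lines between consecutive headers (takeWhile/dropWhile), emitting each non-empty group; the fallback block is kept behaviourally identical but written with comprehensions/filter instead of an accumulator loop.
import Mathlib
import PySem

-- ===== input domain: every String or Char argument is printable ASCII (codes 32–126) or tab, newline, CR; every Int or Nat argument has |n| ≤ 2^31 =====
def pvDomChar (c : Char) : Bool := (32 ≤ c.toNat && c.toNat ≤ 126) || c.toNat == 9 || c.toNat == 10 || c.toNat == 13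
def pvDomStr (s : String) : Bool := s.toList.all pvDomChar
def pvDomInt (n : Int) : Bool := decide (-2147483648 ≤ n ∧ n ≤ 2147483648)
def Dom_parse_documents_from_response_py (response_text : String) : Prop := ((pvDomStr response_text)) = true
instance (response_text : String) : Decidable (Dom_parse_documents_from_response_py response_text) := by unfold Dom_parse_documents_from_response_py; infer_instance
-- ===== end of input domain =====

-- B replaces A's running in_document/current_document state machine by a clean-lines-then-group-by-header
-- decomposition (same values everywhere); objective: alternative decomposition, not speed.

-- ===== PORT A =====
-- s.split(sep) for a non-empty literal sep (Str.split? is none only for sep = "")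
def pvSplit (s sep : String) : List String := (PySem.Str.split? s sep).getD []

-- the document-header test, byte-identical in A (inline) and B (helper _is_header);
-- line[0]: only ever applied to non-empty stripped lines (Python's IndexError is unreachable)
def pvIsHeader (line : String) : Bool :=
  (PySem.Str.startswith (PySem.Str.lower line) "**document " && PySem.Str.isIn ":**" line) ||
  (PySem.Str.startswith (PySem.Str.lower line) "document " && PySem.Str.isIn ":" line) ||
  (PySem.Str.startswith (PySem.Str.lower line) "doc " && PySem.Str.isIn ":" line) ||
  (((PySem.Str.pyGet? line 0).map PySem.Chars.isdigit).getD false &&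
     PySem.Str.isIn "." line && PySem.Str.isIn ":" line)

-- the loop body of A's for-line state machine; state = (documents, current_document, in_document)
def pvStepA (st : List String × List String × Bool) (rawline : String) :
    List String × List String × Bool :=
  let documents := st.1
  let current_document := st.2.1
  let in_document := st.2.2
  let line := PySem.Str.strip rawline
  if line == "" then st
  else if pvIsHeader line then
    if !current_document.isEmpty && in_document then
      (documents ++ [PySem.Str.strip (PySem.Str.join "\n" current_document)], [], true)
    else (documents, current_document, true)
  else if in_document then (documents, current_document ++ [line], in_document)
  else st

def parse_documents_from_response_py (response_text : String) : List String :=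
  let lines := pvSplit (PySem.Str.strip response_text) "\n"
  let st := lines.foldl pvStepA ([], [], false)
  let documents :=
    if !st.2.1.isEmpty && st.2.2 then st.1 ++ [PySem.Str.strip (PySem.Str.join "\n" st.2.1)]
    else st.1
  if documents.isEmpty && !(PySem.Str.strip response_text == "") then
    let parts := pvSplit response_text "\n\n"
    let documents :=
      if 1 < parts.length then
        parts.foldl (fun acc part =>
          let part := PySem.Str.strip part
          if !(part == "") && !PySem.Str.startswith (PySem.Str.lower part) "document" then
            acc ++ [part]
          else acc) documents
      else documents
    if documents.isEmpty then documents ++ [PySem.Str.strip response_text] else documents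
  else documents

-- ===== PORT B =====
-- group content lines between consecutive headers; input starts at a header line
def pvGroups : List String → List String
  | [] => []
  | _ :: rest =>
    let content := rest.takeWhile (fun l => !pvIsHeader l)
    (if content.isEmpty then [] else [PySem.Str.strip (PySem.Str.join "\n" content)]) ++
      pvGroups (rest.dropWhile (fun l => !pvIsHeader l))
termination_by lines => lines.length
decreasing_by
  simp only [List.length_cons]
  exact Nat.lt_succ_of_le (List.length_dropWhile_le _ _)

def parse_documents_from_response_py_alt (response_text : String) : List String :=
  let lines := ((pvSplit (PySem.Str.strip response_text) "\n").map PySem.Str.strip).filter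
    (fun s => !(s == ""))
  let documents := pvGroups (lines.dropWhile (fun l => !pvIsHeader l))
  if documents.isEmpty && !(PySem.Str.strip response_text == "") then
    let parts := (pvSplit response_text "\n\n").map PySem.Str.strip
    let documents :=
      if 1 < parts.length then
        parts.filter (fun p => !(p == "") && !PySem.Str.startswith (PySem.Str.lower p) "document")
      else []
    if documents.isEmpty then [PySem.Str.strip response_text] else documents
  else documents

-- ===== PRECONDITION & SPEC =====
def Spec_parse_documents_from_response_py (response_text : String) (out : List String) : Prop := out = parse_documents_from_response_py_alt response_text
instance (response_text : String) (out : List String) : Decidable (Spec_parse_documents_from_response_py response_text out) := by unfold Spec_parse_documents_from_response_py; infer_instance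

-- ===== CLAIM (what is proved, stated in full; the proofs are below) =====
def Claim_equal_parse_documents_from_response_py : Prop := ∀ (response_text : String), Dom_parse_documents_from_response_py response_text → Spec_parse_documents_from_response_py response_text (parse_documents_from_response_py response_text)

-- ===== LEMMAS AND PROOFS =====

-- the stripped, non-empty lines A effectively iterates over
def pvClean (ls : List String) : List String :=
  (ls.map PySem.Str.strip).filter (fun s => !(s == ""))

-- the emitted document for a pending content buffer
def pvEmit (cur : List String) : List String :=
  if cur.isEmpty then [] else [PySem.Str.strip (PySem.Str.join "\n" cur)]

-- A's in_document = true phase as a function of the pending buffer and the remaining clean lines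
def pvG : List String → List String → List String
  | cur, [] => pvEmit cur
  | cur, l :: ls => if pvIsHeader l then pvEmit cur ++ pvG [] ls else pvG (cur ++ [l]) ls

-- the final flush after A's loop
def pvFin (st : List String × List String × Bool) : List String :=
  if !st.2.1.isEmpty && st.2.2 then st.1 ++ [PySem.Str.strip (PySem.Str.join "\n" st.2.1)]
  else st.1

lemma pvGroups_cons (x : String) (rest : List String) :
    pvGroups (x :: rest) =
      pvEmit (rest.takeWhile (fun l => !pvIsHeader l)) ++
        pvGroups (rest.dropWhile (fun l => !pvIsHeader l)) := by
  rw [pvGroups]; simp [pvEmit]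

lemma pvG_eq_groups (ls : List String) (cur : List String) :
    pvG cur ls = pvEmit (cur ++ ls.takeWhile (fun l => !pvIsHeader l)) ++
      pvGroups (ls.dropWhile (fun l => !pvIsHeader l)) := by
  induction ls generalizing cur with
  | nil =>
    simp only [List.takeWhile_nil, List.dropWhile_nil, List.append_nil]
    rw [pvGroups]
    simp [pvG]
  | cons l ls ih =>
    by_cases h : pvIsHeader l = true
    · have hn : ¬ ((fun l => !pvIsHeader l) l = true) := by simp [h]
      rw [List.takeWhile_cons_of_neg (p := fun l => !pvIsHeader l) hn,
        List.dropWhile_cons_of_neg (p := fun l => !pvIsHeader l) hn, List.append_nil,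
        pvGroups_cons]
      simp only [pvG, h, reduceIte, ih [], List.nil_append]
    · have hp : (fun l => !pvIsHeader l) l = true := by simp [h]
      rw [List.takeWhile_cons_of_pos (p := fun l => !pvIsHeader l) hp,
        List.dropWhile_cons_of_pos (p := fun l => !pvIsHeader l) hp]
      simp only [pvG, h, Bool.false_eq_true, reduceIte, ih (cur ++ [l]), List.append_assoc,
        List.cons_append, List.nil_append]

lemma pvStepA_header (docs cur : List String) (inD : Bool) (l : String)
    (hne : ¬ (PySem.Str.strip l == "") = true)
    (hh : pvIsHeader (PySem.Str.strip l) = true) :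
    pvStepA (docs, cur, inD) l =
      if !cur.isEmpty && inD then
        (docs ++ [PySem.Str.strip (PySem.Str.join "\n" cur)], [], true)
      else (docs, cur, true) := by
  simp [pvStepA, hne, hh]

lemma pvStepA_nonheader (docs cur : List String) (inD : Bool) (l : String)
    (hne : ¬ (PySem.Str.strip l == "") = true)
    (hh : pvIsHeader (PySem.Str.strip l) = false) :
    pvStepA (docs, cur, inD) l =
      if inD then (docs, cur ++ [PySem.Str.strip l], inD) else (docs, cur, inD) := by
  simp [pvStepA, hne, hh]

lemma pvStepA_empty (st : List String × List String × Bool) (l : String)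
    (he : (PySem.Str.strip l == "") = true) : pvStepA st l = st := by
  simp only [pvStepA, he, reduceIte]

lemma pvClean_cons (l : String) (ls : List String) :
    pvClean (l :: ls) =
      if (PySem.Str.strip l == "") = true then pvClean ls
      else PySem.Str.strip l :: pvClean ls := by
  simp only [pvClean, List.map_cons, List.filter_cons]
  split_ifs with h <;> simp_all

lemma pvFoldT (ls : List String) (docs cur : List String) :
    pvFin (ls.foldl pvStepA (docs, cur, true)) = docs ++ pvG cur (pvClean ls) := by
  induction ls generalizing docs cur with
  | nil =>
    simp only [List.foldl_nil, pvClean, List.map_nil, List.filter_nil, pvG, pvFin, pvEmit]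
    by_cases hc : cur.isEmpty <;> simp [hc]
  | cons l ls ih =>
    rw [List.foldl_cons, pvClean_cons]
    by_cases he : (PySem.Str.strip l == "") = true
    · rw [pvStepA_empty _ _ he, if_pos he]; exact ih docs cur
    · rw [if_neg he]
      by_cases hh : pvIsHeader (PySem.Str.strip l) = true
      · rw [pvStepA_header docs cur true l he hh]
        by_cases hc : cur.isEmpty = true
        · have : cur = [] := List.isEmpty_iff.mp hc
          subst this
          simp only [List.isEmpty_nil, Bool.not_true, Bool.false_and, Bool.false_eq_true,
            reduceIte, ih]
          simp [pvG, hh, pvEmit]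
        · simp only [hc, Bool.not_false, Bool.true_and, reduceIte, ih, List.append_assoc]
          simp [pvG, hh, pvEmit, hc]
      · simp only [Bool.not_eq_true] at hh
        rw [pvStepA_nonheader docs cur true l he hh, if_pos rfl]
        rw [ih docs (cur ++ [PySem.Str.strip l])]
        simp [pvG, hh]

lemma pvFoldF (ls : List String) (docs : List String) :
    pvFin (ls.foldl pvStepA (docs, [], false)) =
      docs ++ pvGroups ((pvClean ls).dropWhile (fun l => !pvIsHeader l)) := by
  induction ls generalizing docs with
  | nil => simp [pvClean, pvFin, pvGroups]
  | cons l ls ih =>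
    rw [List.foldl_cons, pvClean_cons]
    by_cases he : (PySem.Str.strip l == "") = true
    · rw [pvStepA_empty _ _ he, if_pos he]; exact ih docs
    · rw [if_neg he]
      by_cases hh : pvIsHeader (PySem.Str.strip l) = true
      · rw [pvStepA_header docs [] false l he hh]
        simp only [List.isEmpty_nil, Bool.not_true, Bool.false_and, Bool.false_eq_true,
          reduceIte]
        rw [pvFoldT ls docs []]
        rw [List.dropWhile_cons_of_neg (p := fun l => !pvIsHeader l) (by simp [hh]), pvGroups_cons]
        rw [pvG_eq_groups]
        simp
      · simp only [Bool.not_eq_true] at hh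
        rw [pvStepA_nonheader docs [] false l he hh, if_neg (by simp)]
        rw [ih docs, List.dropWhile_cons_of_pos (p := fun l => !pvIsHeader l) (by simp [hh])]

lemma pvFallbackFold (parts : List String) (acc : List String) :
    parts.foldl (fun acc part =>
        let part := PySem.Str.strip part
        if !(part == "") && !PySem.Str.startswith (PySem.Str.lower part) "document" then
          acc ++ [part]
        else acc) acc =
      acc ++ (parts.map PySem.Str.strip).filter
        (fun p => !(p == "") && !PySem.Str.startswith (PySem.Str.lower p) "document") := by
  induction parts generalizing acc with
  | nil => simp
  | cons p ps ih =>
    simp only [List.foldl_cons, List.map_cons, List.filter_cons]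
    split_ifs with h <;> simp_all

-- the fallback block of A equals the fallback block of B, for any prior documents D
lemma pvTail (t : String) (D : List String) :
    (if (D.isEmpty && !(PySem.Str.strip t == "")) = true then
      let parts := pvSplit t "\n\n"
      let documents :=
        if 1 < parts.length then
          parts.foldl (fun acc part =>
            let part := PySem.Str.strip part
            if !(part == "") && !PySem.Str.startswith (PySem.Str.lower part) "document" then
              acc ++ [part]
            else acc) D
        else D
      if documents.isEmpty then documents ++ [PySem.Str.strip t] else documents
    else D) =
    (if (D.isEmpty && !(PySem.Str.strip t == "")) = true then
      let parts := (pvSplit t "\n\n").map PySem.Str.strip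
      let documents :=
        if 1 < parts.length then
          parts.filter
            (fun p => !(p == "") && !PySem.Str.startswith (PySem.Str.lower p) "document")
        else []
      if documents.isEmpty then [PySem.Str.strip t] else documents
    else D) := by
  by_cases hd : (D.isEmpty && !(PySem.Str.strip t == "")) = true
  · rw [if_pos hd, if_pos hd]
    have hD : D = [] := by
      have h := hd
      simp only [Bool.and_eq_true, List.isEmpty_iff] at h
      exact h.1
    subst hD
    simp only [pvFallbackFold, List.nil_append, List.length_map]
    by_cases hl : 1 < (pvSplit t "\n\n").length
    · rw [if_pos hl]
      split_ifs with he
      · rw [List.isEmpty_iff.mp he]; rfl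
      · rfl
    · rw [if_neg hl]
      simp
  · rw [if_neg hd, if_neg hd]

-- ===== VERDICT (by name: the statement is the Claim_ definition above) =====
theorem parse_documents_from_response_py_spec : Claim_equal_parse_documents_from_response_py := by
  intro t _
  show parse_documents_from_response_py t = parse_documents_from_response_py_alt t
  have hmain := pvFoldF (pvSplit (PySem.Str.strip t) "\n") []
  simp only [pvFin, pvClean, List.nil_append] at hmain
  unfold parse_documents_from_response_py parse_documents_from_response_py_alt
  simp only [hmain]
  exact pvTail t _
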